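-- pv_equiv track=rewrite | github.com/FredieGeorge/AdventofCode2023 | Code/Day20/helper.py | return_first_common
-- ===== SOURCE A (Python) =====
-- def return_first_common(a_1,d_1,a_2,d_2):
--     #return first common element of aps a_1,a_1+d_1,a_1+2*d_1,... and a_2,a_2+d_2,a_2+2*d_2,...
--     #return False if no common element
--
--     #find first common element of a_1 and a_2
--     i=0
--     j=0
--     while a_1+i*d_1!=a_2+j*d_2:
--         if a_1+i*d_1<a_2+j*d_2:
--             i+=1
--         else:
--             j+=1
--     return a_1+i*d_1
-- ===== SOURCE B (Python) =====
-- def _egcd(a, b):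
--     # extended Euclid: returns (g, x, y) with g = x*a + y*b
--     if b == 0:
--         return a, 1, 0
--     g, x, y = _egcd(b, a % b)
--     return g, y, x - (a // b) * y
--
-- def return_first_common(a_1, d_1, a_2, d_2):
--     # smallest x >= max(a_1, a_2) with x ≡ a_1 (mod d_1) and x ≡ a_2 (mod d_2),
--     # computed in O(log) by extended Euclid / CRT instead of stepping the two APs.
--     g, p, _q = _egcd(d_1, d_2)
--     x0 = a_1 + (a_2 - a_1) // g * p * d_1     # one solution of both congruences
--     l = d_1 // g * d_2                        # lcm(d_1, d_2)
--     lo = max(a_1, a_2)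
--     return lo + (x0 - lo) % l
-- ===== Notes on version B (the rewrite author's own statement) =====
-- stated objective: faster
-- what changed: Replaces A's step-by-step merge of the two progressions (advancing i or j one term at a time until the terms coincide) by a closed form: extended Euclid gives a Bezout coefficient, CRT gives one solution of the two congruences, and the answer is the smallest solution >= max(a_1,a_2), obtained with one modulo by the lcm.
-- outside the precondition, e.g. on return_first_common(3, 2, 3, 0): A returns 3, B raises ZeroDivisionError; on return_first_common(5, 0, 5, 0): A returns 5, B raises ZeroDivisionError; on return_first_common(10, -3, 0, 2): A returns 10, B returns 10
import Mathlib
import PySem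

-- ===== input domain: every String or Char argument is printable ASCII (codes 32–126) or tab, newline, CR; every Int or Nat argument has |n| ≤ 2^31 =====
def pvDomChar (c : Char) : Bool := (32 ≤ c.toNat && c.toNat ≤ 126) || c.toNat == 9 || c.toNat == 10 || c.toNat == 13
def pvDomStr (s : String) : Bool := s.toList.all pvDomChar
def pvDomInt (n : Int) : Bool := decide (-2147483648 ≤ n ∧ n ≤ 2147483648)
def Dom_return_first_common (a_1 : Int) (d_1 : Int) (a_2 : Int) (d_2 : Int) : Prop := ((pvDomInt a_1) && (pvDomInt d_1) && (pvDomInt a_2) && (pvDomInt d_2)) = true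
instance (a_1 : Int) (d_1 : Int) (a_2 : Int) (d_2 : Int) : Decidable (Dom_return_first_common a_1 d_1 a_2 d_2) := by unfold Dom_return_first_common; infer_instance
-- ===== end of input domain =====

-- B replaces A's step-by-step merge of the two progressions by an extended-Euclid / CRT
-- closed form (smallest common term ≥ max(a_1,a_2)); equivalence is about the return value.

-- ===== PORT A =====
-- A's while loop, i/j merge; fuel only makes it total (under Pre_ the fuel is never exhausted).
def rfcLoop (a_1 : Int) (d_1 : Int) (a_2 : Int) (d_2 : Int) : Nat → Int → Int → Int
  | 0, i, _j => a_1 + i * d_1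
  | fuel+1, i, j =>
    if a_1 + i * d_1 ≠ a_2 + j * d_2 then
      if a_1 + i * d_1 < a_2 + j * d_2 then rfcLoop a_1 d_1 a_2 d_2 fuel (i+1) j
      else rfcLoop a_1 d_1 a_2 d_2 fuel i (j+1)
    else a_1 + i * d_1

def return_first_common (a_1 : Int) (d_1 : Int) (a_2 : Int) (d_2 : Int) : Int :=
  rfcLoop a_1 d_1 a_2 d_2 (2 * ((a_1 - a_2).natAbs + (d_1 * d_2).natAbs) + 2) 0 0

-- ===== PORT B =====
-- termination measure for egcd (Python's % has the divisor's sign, so |a % b| < |b|)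
theorem natAbs_pymod_lt (a b : Int) (hb : b ≠ 0) : (PySem.Int.mod a b).natAbs < b.natAbs := by
  rcases lt_trichotomy b 0 with h | h | h
  · have hb' : (0:Int) < -b := by omega
    have e : PySem.Int.mod a b = -PySem.Int.mod (-a) (-b) := by
      have h0 := PySem.Int.mod_neg_neg (-a) (-b)
      rw [neg_neg, neg_neg] at h0
      omega
    have h1 : PySem.Int.mod (-a) (-b) = (-a) % (-b) := PySem.Int.mod_eq_emod_of_pos hb'
    have h2 : 0 ≤ (-a) % (-b) := Int.emod_nonneg _ (by omega)
    have h3 : (-a) % (-b) < -b := Int.emod_lt_of_pos _ hb'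
    rw [e, h1]; omega
  · exact absurd h hb
  · have h1 : PySem.Int.mod a b = a % b := PySem.Int.mod_eq_emod_of_pos h
    have h2 : 0 ≤ a % b := Int.emod_nonneg _ (by omega)
    have h3 : a % b < b := Int.emod_lt_of_pos _ h
    rw [h1]; omega

-- literal port of Source B's recursive _egcd
def egcd (a : Int) (b : Int) : Int × Int × Int :=
  if hb : b = 0 then (a, 1, 0)
  else
    let r := egcd b (PySem.Int.mod a b)
    (r.1, r.2.2, r.2.1 - PySem.Int.floordiv a b * r.2.2)
  termination_by b.natAbs
  decreasing_by exact natAbs_pymod_lt a b hb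

def return_first_common_alt (a_1 : Int) (d_1 : Int) (a_2 : Int) (d_2 : Int) : Int :=
  let t := egcd d_1 d_2
  let g := t.1
  let p := t.2.1
  let x0 := a_1 + PySem.Int.floordiv (a_2 - a_1) g * p * d_1
  let l := PySem.Int.floordiv d_1 g * d_2
  let lo := max a_1 a_2
  lo + PySem.Int.mod (x0 - lo) l

-- ===== PRECONDITION & SPEC =====
-- Pre_ is the natural domain: positive step sizes and a reachable common term
-- (gcd d_1 d_2 divides a_2 - a_1). Outside it A loops forever, except on degenerate
-- corners with a non-positive step where A happens to return a_1 or a_2 (see cites).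
def Pre_return_first_common (a_1 : Int) (d_1 : Int) (a_2 : Int) (d_2 : Int) : Prop :=
  1 ≤ d_1 ∧ 1 ≤ d_2 ∧ (Int.gcd d_1 d_2 : Int) ∣ (a_2 - a_1)
instance (a_1 : Int) (d_1 : Int) (a_2 : Int) (d_2 : Int) : Decidable (Pre_return_first_common a_1 d_1 a_2 d_2) := by unfold Pre_return_first_common; infer_instance

def pvWitness_return_first_common : Int × Int × Int × Int := (0, 2, 1, 3)

def Spec_return_first_common (a_1 : Int) (d_1 : Int) (a_2 : Int) (d_2 : Int) (out : Int) : Prop := out = return_first_common_alt a_1 d_1 a_2 d_2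
instance (a_1 : Int) (d_1 : Int) (a_2 : Int) (d_2 : Int) (out : Int) : Decidable (Spec_return_first_common a_1 d_1 a_2 d_2 out) := by unfold Spec_return_first_common; infer_instance

-- ===== CLAIM (what is proved, stated in full; the proofs are below) =====
def Claim_equal_return_first_common : Prop := ∀ (a_1 : Int) (d_1 : Int) (a_2 : Int) (d_2 : Int), Dom_return_first_common a_1 d_1 a_2 d_2 → Pre_return_first_common a_1 d_1 a_2 d_2 → Spec_return_first_common a_1 d_1 a_2 d_2 (return_first_common a_1 d_1 a_2 d_2)

-- ===== LEMMAS AND PROOFS =====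

-- extended Euclid is correct on nonnegative inputs: gcd plus a Bézout identity
-- gcd recurrence used by egcd_spec
theorem gcd_emod_step (a b : Int) : Int.gcd b (a % b) = Int.gcd a b := by
  apply Nat.dvd_antisymm
  · have h1 : (Int.gcd b (a % b) : Int) ∣ b := Int.gcd_dvd_left _ _
    have h2 : (Int.gcd b (a % b) : Int) ∣ a % b := Int.gcd_dvd_right _ _
    have h3 : (Int.gcd b (a % b) : Int) ∣ a := by
      have h4 := dvd_add (h1.mul_right (a / b)) h2
      rwa [show b * (a / b) + a % b = a by rw [Int.emod_def]; ring] at h4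
    exact Int.dvd_gcd h3 h1
  · have h1 : (Int.gcd a b : Int) ∣ a := Int.gcd_dvd_left _ _
    have h2 : (Int.gcd a b : Int) ∣ b := Int.gcd_dvd_right _ _
    have h3 : (Int.gcd a b : Int) ∣ a % b := by
      have e : a % b = a - b * (a / b) := Int.emod_def a b
      rw [e]; exact dvd_sub h1 (h2.mul_right _)
    exact Int.dvd_gcd h2 h3

theorem egcd_spec_aux (n : Nat) : ∀ (b a : Int), b.natAbs = n → 0 ≤ a → 0 ≤ b →
    (egcd a b).1 = Int.gcd a b ∧
    (egcd a b).2.1 * a + (egcd a b).2.2 * b = Int.gcd a b := by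
  induction n using Nat.strong_induction_on with
  | _ n ih =>
    intro b a hn ha hb
    by_cases h : b = 0
    · subst h
      rw [egcd]
      simp [Int.gcd, Int.natAbs_of_nonneg ha]
    · have hbpos : 0 < b := lt_of_le_of_ne hb (Ne.symm h)
      have hm : PySem.Int.mod a b = a % b := PySem.Int.mod_eq_emod_of_pos hbpos
      have hfd : PySem.Int.floordiv a b = a / b := PySem.Int.floordiv_eq_ediv_of_pos hbpos
      have hlt : (a % b).natAbs < n := by
        have h2 : 0 ≤ a % b := Int.emod_nonneg _ (by omega)
        have h3 : a % b < b := Int.emod_lt_of_pos _ hbpos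
        omega
      obtain ⟨ihg, ihb⟩ := ih (a % b).natAbs hlt (a % b) b rfl hb (Int.emod_nonneg _ (by omega))
      rw [egcd]
      simp only [h, dite_false, hm, hfd]
      constructor
      · rw [ihg, gcd_emod_step]
      · rw [gcd_emod_step] at ihb
        have e : a % b = a - b * (a / b) := Int.emod_def a b
        linear_combination ihb - (egcd b (a % b)).2.2 * e

theorem egcd_spec (b a : Int) (ha : 0 ≤ a) (hb : 0 ≤ b) :
    (egcd a b).1 = Int.gcd a b ∧
    (egcd a b).2.1 * a + (egcd a b).2.2 * b = Int.gcd a b :=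
  egcd_spec_aux b.natAbs b a rfl ha hb

-- A's merge loop returns m whenever m is the least common value ≥ both current terms
theorem rfcLoop_eq (a_1 d_1 a_2 d_2 m : Int) (hd1 : 1 ≤ d_1) (hd2 : 1 ≤ d_2)
    (hmin : ∀ x : Int, d_1 ∣ (x - a_1) → d_2 ∣ (x - a_2) → a_1 ≤ x → a_2 ≤ x → m ≤ x) :
    ∀ (fuel : Nat) (i j : Int), 0 ≤ i → 0 ≤ j →
      d_1 ∣ (m - (a_1 + i * d_1)) → d_2 ∣ (m - (a_2 + j * d_2)) →
      a_1 + i * d_1 ≤ m → a_2 + j * d_2 ≤ m →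
      (m - (a_1 + i * d_1)) + (m - (a_2 + j * d_2)) ≤ (fuel : Int) →
      rfcLoop a_1 d_1 a_2 d_2 fuel i j = m := by
  intro fuel
  induction fuel with
  | zero =>
    intro i j hi hj h1 h2 hle1 hle2 hfuel
    simp only [rfcLoop, Nat.cast_zero] at *
    have := le_antisymm hle1 (by linarith)
    linarith
  | succ n ih =>
    intro i j hi hj h1 h2 hle1 hle2 hfuel
    by_cases heq : a_1 + i * d_1 = a_2 + j * d_2
    · simp only [rfcLoop, heq, ne_eq, not_true_eq_false, if_false]
      have hp1 : (0:Int) ≤ i * d_1 := mul_nonneg hi (by omega)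
      have hp2 : (0:Int) ≤ j * d_2 := mul_nonneg hj (by omega)
      have hx := hmin (a_1 + i * d_1) ⟨i, by ring⟩
        (by rw [heq]; exact ⟨j, by ring⟩) (by linarith) (by rw [heq]; linarith)
      linarith
    · simp only [rfcLoop, ne_eq, heq, not_false_eq_true, if_true]
      by_cases hlt : a_1 + i * d_1 < a_2 + j * d_2
      · rw [if_pos hlt]
        have hstep : d_1 ≤ m - (a_1 + i * d_1) :=
          Int.le_of_dvd (by linarith) h1
        have e : a_1 + (i + 1) * d_1 = (a_1 + i * d_1) + d_1 := by ring
        apply ih (i + 1) j (by omega) hj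
        · rw [e]
          have e2 : m - ((a_1 + i * d_1) + d_1) = (m - (a_1 + i * d_1)) - d_1 := by ring
          rw [e2]; exact dvd_sub h1 dvd_rfl
        · exact h2
        · rw [e]; linarith
        · exact hle2
        · rw [e]; push_cast at hfuel ⊢; linarith
      · rw [if_neg hlt]
        have hgt : a_2 + j * d_2 < a_1 + i * d_1 := by
          rcases lt_or_ge (a_2 + j * d_2) (a_1 + i * d_1) with h | h
          · exact h
          · exact absurd (le_antisymm (by linarith) h) (fun hh => heq hh.symm)
        have hstep : d_2 ≤ m - (a_2 + j * d_2) :=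
          Int.le_of_dvd (by linarith) h2
        have e : a_2 + (j + 1) * d_2 = (a_2 + j * d_2) + d_2 := by ring
        apply ih i (j + 1) hi (by omega)
        · exact h1
        · rw [e]
          have e2 : m - ((a_2 + j * d_2) + d_2) = (m - (a_2 + j * d_2)) - d_2 := by ring
          rw [e2]; exact dvd_sub h2 dvd_rfl
        · exact hle1
        · rw [e]; linarith
        · rw [e]; push_cast at hfuel ⊢; linarith

-- B's closed form: characterisation of return_first_common_alt under Pre_
theorem alt_charac (a_1 d_1 a_2 d_2 : Int) (hd1 : 1 ≤ d_1) (hd2 : 1 ≤ d_2)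
    (hdvd : (Int.gcd d_1 d_2 : Int) ∣ (a_2 - a_1)) :
    d_1 ∣ (return_first_common_alt a_1 d_1 a_2 d_2 - a_1) ∧
    d_2 ∣ (return_first_common_alt a_1 d_1 a_2 d_2 - a_2) ∧
    max a_1 a_2 ≤ return_first_common_alt a_1 d_1 a_2 d_2 ∧
    return_first_common_alt a_1 d_1 a_2 d_2 < max a_1 a_2 + d_1 * d_2 ∧
    (∀ x : Int, d_1 ∣ (x - a_1) → d_2 ∣ (x - a_2) → a_1 ≤ x → a_2 ≤ x →
      return_first_common_alt a_1 d_1 a_2 d_2 ≤ x) := by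
  have hg1 : (0:Int) ≤ d_1 := by omega
  have hg2 : (0:Int) ≤ d_2 := by omega
  obtain ⟨hgcd, hbez⟩ := egcd_spec d_2 d_1 hg1 hg2
  have hgne : Int.gcd d_1 d_2 ≠ 0 := fun h => by
    have := Int.eq_zero_of_gcd_eq_zero_left h; omega
  have hgpos : (0:Int) < (Int.gcd d_1 d_2 : Int) := by exact_mod_cast Nat.pos_of_ne_zero hgne
  have hgd1 : (Int.gcd d_1 d_2 : Int) ∣ d_1 := Int.gcd_dvd_left _ _
  have hgd2 : (Int.gcd d_1 d_2 : Int) ∣ d_2 := Int.gcd_dvd_right _ _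
  set G : Int := (Int.gcd d_1 d_2 : Int) with hGdef
  have hfd : PySem.Int.floordiv (a_2 - a_1) (egcd d_1 d_2).1 = (a_2 - a_1) / G := by
    rw [hgcd, PySem.Int.floordiv_eq_ediv_of_pos hgpos]
  have hfl : PySem.Int.floordiv d_1 (egcd d_1 d_2).1 = d_1 / G := by
    rw [hgcd, PySem.Int.floordiv_eq_ediv_of_pos hgpos]
  have hunf : return_first_common_alt a_1 d_1 a_2 d_2
      = max a_1 a_2 + PySem.Int.mod
          ((a_1 + (a_2 - a_1) / G * (egcd d_1 d_2).2.1 * d_1) - max a_1 a_2)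
          ((d_1 / G) * d_2) := by
    simp only [return_first_common_alt, hfd, hfl]
  set p : Int := (egcd d_1 d_2).2.1 with hpdef
  set q : Int := (egcd d_1 d_2).2.2 with hqdef
  set k : Int := (a_2 - a_1) / G with hkdef
  set x0 : Int := a_1 + k * p * d_1 with hx0def
  set l : Int := (d_1 / G) * d_2 with hldef
  set lo : Int := max a_1 a_2 with hlodef
  have hk : G * k = a_2 - a_1 := Int.mul_ediv_cancel' hdvd
  have hd1G : G * (d_1 / G) = d_1 := Int.mul_ediv_cancel' hgd1
  have hd2G : G * (d_2 / G) = d_2 := Int.mul_ediv_cancel' hgd2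
  have hqp : 0 < d_1 / G := by nlinarith
  have hlpos : 0 < l := mul_pos hqp (by omega)
  have hlG : l * G = d_1 * d_2 := by rw [hldef]; linear_combination d_2 * hd1G
  have hd1l : d_1 ∣ l := ⟨d_2 / G, by
    rw [hldef]; linear_combination (d_2 / G) * hd1G - (d_1 / G) * hd2G⟩
  have hd2l : d_2 ∣ l := ⟨d_1 / G, by rw [hldef]; ring⟩
  have hlle : l ≤ d_1 * d_2 := by
    have h1 : d_1 / G ≤ d_1 := Int.ediv_le_self _ hg1
    calc l = (d_1 / G) * d_2 := hldef
    _ ≤ d_1 * d_2 := by nlinarith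
  have hlcm : ∀ y : Int, d_1 ∣ y → d_2 ∣ y → l ∣ y := by
    intro y ⟨u, hu⟩ ⟨v, hv⟩
    refine ⟨v * p + u * q, ?_⟩
    have hcan : y * G = l * (v * p + u * q) * G := by
      linear_combination (p * d_1) * hv + (q * d_2) * hu - y * hbez - (v * p + u * q) * hlG
    exact mul_right_cancel₀ (by omega) hcan
  have hx1 : d_1 ∣ x0 - a_1 := ⟨k * p, by rw [hx0def]; ring⟩
  have hx2 : d_2 ∣ x0 - a_2 := ⟨-(k * q), by rw [hx0def]; linear_combination k * hbez + hk⟩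
  rw [PySem.Int.mod_eq_emod_of_pos hlpos] at hunf
  set r : Int := return_first_common_alt a_1 d_1 a_2 d_2 with hrdef
  have hm0 : 0 ≤ (x0 - lo) % l := Int.emod_nonneg _ (by omega)
  have hm1 : (x0 - lo) % l < l := Int.emod_lt_of_pos _ hlpos
  have hrx0 : l ∣ r - x0 := by
    refine ⟨-((x0 - lo) / l), ?_⟩
    have e : (x0 - lo) % l = (x0 - lo) - l * ((x0 - lo) / l) := by
      rw [Int.emod_def]
    rw [hunf, e]; ring
  have hr1 : d_1 ∣ r - a_1 := by
    have e : r - a_1 = (r - x0) + (x0 - a_1) := by ring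
    rw [e]; exact dvd_add (dvd_trans hd1l hrx0) hx1
  have hr2 : d_2 ∣ r - a_2 := by
    have e : r - a_2 = (r - x0) + (x0 - a_2) := by ring
    rw [e]; exact dvd_add (dvd_trans hd2l hrx0) hx2
  have hlor : lo ≤ r := by rw [hunf]; linarith
  have hrup : r < lo + l := by rw [hunf]; linarith
  refine ⟨hr1, hr2, hlor, by linarith, ?_⟩
  intro x hxx1 hxx2 hxa1 hxa2
  have hxr1 : d_1 ∣ x - r := by
    have e : x - r = (x - a_1) - (r - a_1) := by ring
    rw [e]; exact dvd_sub hxx1 hr1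
  have hxr2 : d_2 ∣ x - r := by
    have e : x - r = (x - a_2) - (r - a_2) := by ring
    rw [e]; exact dvd_sub hxx2 hr2
  have hxlo : lo ≤ x := max_le hxa1 hxa2
  by_contra hcon
  have hcon' : x < r := lt_of_not_ge hcon
  have hpos : 0 < r - x := by linarith
  have hdl : l ∣ r - x := by
    have e : r - x = -(x - r) := by ring
    rw [e]; exact dvd_neg.mpr (hlcm _ hxr1 hxr2)
  have := Int.le_of_dvd hpos hdl
  linarith

-- ===== VERDICT (by name: the statement is the Claim_ definition above) =====
theorem return_first_common_spec : Claim_equal_return_first_common := by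
  intro a_1 d_1 a_2 d_2 _hdom hpre
  obtain ⟨hd1, hd2, hdvd⟩ := hpre
  obtain ⟨hc1, hc2, hlo, hub, hmin⟩ := alt_charac a_1 d_1 a_2 d_2 hd1 hd2 hdvd
  unfold Spec_return_first_common return_first_common
  set r := return_first_common_alt a_1 d_1 a_2 d_2 with hr
  apply rfcLoop_eq a_1 d_1 a_2 d_2 r hd1 hd2 hmin _ 0 0 le_rfl le_rfl
  · simpa using hc1
  · simpa using hc2
  · simp only [zero_mul, add_zero]; exact le_trans (le_max_left _ _) hlo
  · simp only [zero_mul, add_zero]; exact le_trans (le_max_right _ _) hlo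
  · have hdd : 0 < d_1 * d_2 := mul_pos (by omega) (by omega)
    have h1 : |d_1 * d_2| = d_1 * d_2 := abs_of_pos hdd
    have h2 : a_1 - a_2 ≤ |a_1 - a_2| := le_abs_self _
    have h3 : a_2 - a_1 ≤ |a_1 - a_2| := by rw [abs_sub_comm]; exact le_abs_self _
    simp only [zero_mul, add_zero]
    push_cast
    rcases le_total a_1 a_2 with h | h
    · rw [max_eq_right h] at hlo hub
      linarith
    · rw [max_eq_left h] at hlo hub
      linarith
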